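-- pv_equiv track=rewrite | github.com/rasel-isu/kgcretriever | dataset_loader/load.py | id_to_text
-- ===== SOURCE A (Python) =====
-- def id_to_text(data):
--     result = {}
--     for line in data:
--         parts = line.strip().split('\t')
--         id_key = parts[0]  # The ID will be the key
--         value_text = '\t'.join(parts[1:])
--         if id_key in result:
--             result[id_key] += f' {value_text}'
--         else:
--             result[id_key] = value_text
--     return result
-- ===== SOURCE B (Python) =====
-- def id_to_text(data):
--     pairs = []
--     for line in data:
--         parts = line.strip().split('\t')
--         pairs.append((parts[0], '\t'.join(parts[1:])))
--     keys = []
--     for k, _ in pairs: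
--         if k not in keys:
--             keys.append(k)
--     return {k: ' '.join(v for kk, v in pairs if kk == k) for k in keys}
-- ===== Notes on version B (the rewrite author's own statement) =====
-- stated objective: alternative
-- what changed: B does no dict accumulation at all: it materialises the (key, value) pairs, computes the first-seen-ordered distinct keys, and then builds each output entry by one filtering scan over all pairs joined with spaces, instead of A's single pass that branches on key-present and grows strings inside a dict.
import Mathlib
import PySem

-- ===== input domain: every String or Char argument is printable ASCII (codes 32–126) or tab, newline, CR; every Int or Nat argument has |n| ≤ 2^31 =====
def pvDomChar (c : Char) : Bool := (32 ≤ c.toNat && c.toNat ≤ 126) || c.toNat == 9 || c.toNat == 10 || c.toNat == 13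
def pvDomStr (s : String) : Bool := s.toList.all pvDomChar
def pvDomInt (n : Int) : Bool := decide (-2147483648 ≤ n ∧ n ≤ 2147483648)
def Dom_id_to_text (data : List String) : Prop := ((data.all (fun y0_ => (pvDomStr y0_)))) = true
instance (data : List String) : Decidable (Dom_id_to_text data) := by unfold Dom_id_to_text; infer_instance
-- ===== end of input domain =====

-- B avoids dict accumulation entirely: it lists the (key, value) pairs, dedups the keys in
-- first-seen order, then builds each output entry by one filtering scan over the pairs;
-- objective: alternative algorithm (staged passes instead of A's running-concatenation dict).

-- ===== PORT A =====
-- 'line.strip().split("\t")' : sep = "\t" ≠ "", so split? is always `some`, and the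
-- resulting list is always nonempty, so parts[0] (headD "") never hits its default.
def id_to_text (data : List String) : List (String × String) :=
  (data.foldl (fun result line =>
      let parts := (PySem.Str.split? (PySem.Str.strip line) "\t").getD []
      let id_key := parts.headD ""
      let value_text := PySem.Str.join "\t" (parts.drop 1)
      if result.contains id_key then
        result.insert id_key (result.getD id_key "" ++ " " ++ value_text)
      else
        result.insert id_key value_text)
    (PySem.Dict.empty : PySem.Dict String String)).items

-- ===== PORT B =====
-- pass 1: the pairs list; pass 2: 'if k not in keys: keys.append(k)' as a fold over the
-- pairs; pass 3: the dict comprehension '{k: ' '.join(v for kk, v in pairs if kk == k)}'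
-- as a map over keys with a filter over pairs.
def id_to_text_alt (data : List String) : List (String × String) :=
  let pairs := data.map (fun line =>
    let parts := (PySem.Str.split? (PySem.Str.strip line) "\t").getD []
    (parts.headD "", PySem.Str.join "\t" (parts.drop 1)))
  let keys := pairs.foldl (fun ks p => if ks.contains p.1 then ks else ks ++ [p.1]) ([] : List String)
  keys.map (fun k => (k, PySem.Str.join " " ((pairs.filter (fun p => p.1 == k)).map Prod.snd)))

-- ===== PRECONDITION & SPEC =====
def Spec_id_to_text (data : List String) (out : List (String × String)) : Prop := out = id_to_text_alt data
instance (data : List String) (out : List (String × String)) : Decidable (Spec_id_to_text data out) := by unfold Spec_id_to_text; infer_instance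

-- ===== CLAIM (what is proved, stated in full; the proofs are below) =====
def Claim_equal_id_to_text : Prop := ∀ (data : List String), Dom_id_to_text data → Spec_id_to_text data (id_to_text data)

-- ===== LEMMAS AND PROOFS =====

-- proof-only abbreviations for B's three stages
def pvPair (line : String) : String × String :=
  let parts := (PySem.Str.split? (PySem.Str.strip line) "\t").getD []
  (parts.headD "", PySem.Str.join "\t" (parts.drop 1))

def pvKeys (ps : List (String × String)) : List String :=
  ps.foldl (fun ks p => if ks.contains p.1 then ks else ks ++ [p.1]) []

def pvG (ps : List (String × String)) : List (String × String) :=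
  (pvKeys ps).map (fun k => (k, PySem.Str.join " " ((ps.filter (fun p => p.1 == k)).map Prod.snd)))

lemma mem_foldl_keys (ps : List (String × String)) (ks : List String) (k : String) :
    k ∈ ps.foldl (fun ks p => if ks.contains p.1 then ks else ks ++ [p.1]) ks
      ↔ k ∈ ks ∨ k ∈ ps.map Prod.fst := by
  induction ps generalizing ks with
  | nil => simp
  | cons p t ih =>
    simp only [List.foldl_cons, List.map_cons, List.mem_cons, ih]
    split_ifs with h
    · simp only [List.contains_eq_mem, decide_eq_true_eq] at h
      constructor
      · tauto
      · rintro (hk | hk | hk)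
        · exact Or.inl hk
        · exact Or.inl (hk ▸ h)
        · exact Or.inr hk
    · simp only [List.mem_append, List.mem_singleton]
      tauto

lemma mem_pvKeys (ps : List (String × String)) (k : String) :
    k ∈ pvKeys ps ↔ k ∈ ps.map Prod.fst := by
  unfold pvKeys; rw [mem_foldl_keys]; simp

lemma nodup_foldl_keys (ps : List (String × String)) (ks : List String) (h : ks.Nodup) :
    (ps.foldl (fun ks p => if ks.contains p.1 then ks else ks ++ [p.1]) ks).Nodup := by
  induction ps generalizing ks with
  | nil => simpa using h
  | cons p t ih =>
    simp only [List.foldl_cons]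
    split_ifs with hc
    · exact ih ks h
    · apply ih
      simp only [List.contains_eq_mem, decide_eq_true_eq] at hc
      exact List.Nodup.append h (List.nodup_singleton _)
        (by intro a ha hb; simp only [List.mem_singleton] at hb; exact hc (hb ▸ ha))

lemma nodup_pvKeys (ps : List (String × String)) : (pvKeys ps).Nodup :=
  nodup_foldl_keys ps [] List.nodup_nil

lemma pvKeys_append (ps : List (String × String)) (p : String × String) :
    pvKeys (ps ++ [p])
      = if (pvKeys ps).contains p.1 then pvKeys ps else pvKeys ps ++ [p.1] := by
  unfold pvKeys; rw [List.foldl_append]; rfl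

lemma map_fst_pvG (ps : List (String × String)) : (pvG ps).map Prod.fst = pvKeys ps := by
  unfold pvG
  rw [List.map_map]
  show (pvKeys ps).map id = pvKeys ps
  exact List.map_id _

-- join with a single space of a one-element group
lemma join_single (v : String) : PySem.Str.join " " [v] = v := by
  apply String.ext
  simp [PySem.Str.toList_join, PySem.Chars.join, List.intercalate]

-- appending one more piece to a nonempty group = A's ' ' concatenation step
lemma join_append (vs : List String) (v : String) (h : vs ≠ []) :
    PySem.Str.join " " (vs ++ [v]) = PySem.Str.join " " vs ++ " " ++ v := by
  apply String.ext
  simp only [PySem.Str.toList_join, String.toList_append]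
  induction vs with
  | nil => simp at h
  | cons a t ih =>
    cases t with
    | nil => simp [PySem.Chars.join, List.intercalate]
    | cons b t' =>
      simp only [List.map_cons, List.cons_append, PySem.Chars.join_cons_cons] at *
      simp only [ih (by simp), List.append_assoc]

lemma filter_nonempty_of_mem (ps : List (String × String)) (k : String)
    (h : k ∈ ps.map Prod.fst) : ps.filter (fun p => p.1 == k) ≠ [] := by
  obtain ⟨p, hp, hk⟩ := List.mem_map.mp h
  intro hnil
  have : p ∈ ps.filter (fun p => p.1 == k) := List.mem_filter.mpr ⟨hp, by simp [hk]⟩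
  simp [hnil] at this

-- one loop step of A, expressed on the pair level, preserves 'items = pvG of processed pairs'
lemma step_invariant (ps : List (String × String)) (k0 v0 : String)
    (d : PySem.Dict String String) (hrel : d.items = pvG ps) :
    (if d.contains k0 then d.insert k0 (d.getD k0 "" ++ " " ++ v0)
     else d.insert k0 v0).items = pvG (ps ++ [(k0, v0)]) := by
  have hkeys : d.keys = pvKeys ps := by
    show d.items.map Prod.fst = _
    rw [hrel, map_fst_pvG]
  have hnd : d.keys.Nodup := by rw [hkeys]; exact nodup_pvKeys ps
  have hcont : d.contains k0 = decide (k0 ∈ pvKeys ps) := by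
    rw [PySem.Dict.contains_eq_decide_mem_keys, hkeys]
  by_cases hmem : k0 ∈ pvKeys ps
  · -- existing key: A updates in place; B's filter for that key gains one element at the end
    have hc : d.contains k0 = true := by rw [hcont]; exact decide_eq_true hmem
    have hgd : d.getD k0 ""
        = PySem.Str.join " " ((ps.filter (fun q => q.1 == k0)).map Prod.snd) := by
      have hin : (k0, PySem.Str.join " " ((ps.filter (fun q => q.1 == k0)).map Prod.snd))
          ∈ d.items := by
        rw [hrel]; exact List.mem_map.mpr ⟨k0, hmem, rfl⟩
      exact PySem.Dict.getD_of_mem_items d hin hnd ""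
    rw [if_pos hc, PySem.Dict.items_insert_of_contains d _ hc, hrel]
    unfold pvG
    rw [pvKeys_append, if_pos (by simpa using hmem), List.map_map]
    apply List.map_congr_left
    intro k hk
    simp only [Function.comp_apply]
    by_cases hkp : k = k0
    · subst hkp
      have hne : ((ps.filter (fun q => q.1 == k)).map Prod.snd) ≠ [] := by
        intro h0
        exact filter_nonempty_of_mem ps k ((mem_pvKeys ps k).mp hmem)
          (List.map_eq_nil_iff.mp h0)
      have hfa : (ps ++ [(k, v0)]).filter (fun q => q.1 == k)
          = ps.filter (fun q => q.1 == k) ++ [(k, v0)] := by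
        simp [List.filter_append]
      rw [hfa, List.map_append]
      simp only [List.map_cons, List.map_nil]
      rw [join_append _ _ hne]
      simp [hgd]
    · have hfa : (ps ++ [(k0, v0)]).filter (fun q => q.1 == k)
          = ps.filter (fun q => q.1 == k) := by
        simp [List.filter_append, show ¬ k0 = k from fun h => hkp h.symm]
      rw [hfa]
      simp [hkp]
  · -- new key: both sides append a fresh entry, whose group is the singleton [v0]
    have hc : d.contains k0 = false := by rw [hcont]; exact decide_eq_false hmem
    have hnotin : k0 ∉ ps.map Prod.fst := fun h => hmem ((mem_pvKeys ps k0).mpr h)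
    rw [if_neg (by simp [hc]), PySem.Dict.items_insert_of_not_contains d _ hc, hrel]
    unfold pvG
    rw [pvKeys_append, if_neg (by simpa using hmem), List.map_append]
    congr 1
    · apply List.map_congr_left
      intro k hk
      have hkne : ¬ k0 = k := fun h => hmem (h ▸ hk)
      have hfa : (ps ++ [(k0, v0)]).filter (fun q => q.1 == k)
          = ps.filter (fun q => q.1 == k) := by
        simp [List.filter_append, hkne]
      rw [hfa]
    · have hfil : ps.filter (fun q => q.1 == k0) = [] := by
        rw [List.filter_eq_nil_iff]
        intro q hq
        simp only [beq_iff_eq]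
        exact fun h => hnotin (List.mem_map.mpr ⟨q, hq, h⟩)
      simp [List.filter_append, hfil, join_single]

-- the whole of A's loop computes pvG of the pairs list
set_option maxHeartbeats 1000000 in
lemma fold_eq_pvG (data : List String) :
    (data.foldl (fun result line =>
        let parts := (PySem.Str.split? (PySem.Str.strip line) "\t").getD []
        let id_key := parts.headD ""
        let value_text := PySem.Str.join "\t" (parts.drop 1)
        if result.contains id_key then
          result.insert id_key (result.getD id_key "" ++ " " ++ value_text)
        else
          result.insert id_key value_text)
      (PySem.Dict.empty : PySem.Dict String String)).items
    = pvG (data.map pvPair) := by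
  induction data using List.reverseRecOn with
  | nil => rfl
  | append_singleton t line ih =>
    rw [List.foldl_append, List.map_append, List.foldl_cons, List.foldl_nil]
    exact step_invariant (t.map pvPair) (pvPair line).1 (pvPair line).2 _ ih

-- ===== VERDICT (by name: the statement is the Claim_ definition above) =====
theorem id_to_text_spec : Claim_equal_id_to_text := by
  intro data _
  show id_to_text data = id_to_text_alt data
  unfold id_to_text id_to_text_alt
  exact fold_eq_pvG data
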